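-- pv_equiv track=rewrite | github.com/AJ-Davis/veritas_logos | src/document_ingestion/pdf_parser.py | _determine_section_type
-- ===== SOURCE A (Python) =====
-- def _determine_section_type(text: str) -> str:
--     """
--     Determine the type of a text section.
--
--     Args:
--         text: Section text
--
--     Returns:
--         Section type
--     """
--     text = text.strip()
--     lines = text.split('\n')
--
--     # Check for headings (short lines, often centered or bold-formatted)
--     if len(lines) == 1 and len(text) < 100:
--         # Check if it looks like a heading
--         if text.isupper() or not text.endswith('.'):
--             return "heading"
--
--     # Check for lists
--     if any(line.strip().startswith(('•', '-', '*', '◦')) for line in lines):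
--         return "list_item"
--
--     # Check for numbered lists
--     if any(line.strip() and line.strip()[0].isdigit() and
--            ('.' in line[:10] or ')' in line[:10]) for line in lines):
--         return "list_item"
--
--     # Check for tables (multiple columns separated by spaces)
--     if len(lines) > 1:
--         # Simple heuristic: if multiple lines have similar structure, might be a table
--         space_counts = [line.count('  ') for line in lines if line.strip()]
--         if space_counts and max(space_counts) >= 2 and len(set(space_counts)) <= 2:
--             return "table"
--
--     # Default to paragraph
--     return "paragraph"
-- ===== SOURCE B (Python) =====
-- def _determine_section_type(text: str) -> str:
--     text = text.strip()
--     lines = text.split('\n')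
--     if len(lines) == 1 and len(text) < 100 and (text.isupper() or not text.endswith('.')):
--         return "heading"
--     return _scan(lines, len(lines) > 1, [])
--
--
-- def _scan(lines, multi, counts):
--     # Recursive classifier: returns "list_item" at the FIRST list-like line
--     # (bullet or numbered, merged into one per-line test), otherwise recurses,
--     # accumulating the double-space counts of non-blank lines; at the end it
--     # applies the table test, else paragraph.
--     if not lines:
--         if multi and counts and max(counts) >= 2 and len(set(counts)) <= 2:
--             return "table"
--         return "paragraph"
--     line, rest = lines[0], lines[1:]
--     s = line.strip()
--     if s and (s[0] in '•-*◦' or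
--               (s[0].isdigit() and ('.' in line[:10] or ')' in line[:10]))):
--         return "list_item"
--     return _scan(rest, multi, counts + [line.count('  ')] if s else counts)
-- ===== Notes on version B (the rewrite author's own statement) =====
-- stated objective: alternative
-- what changed: B replaces A's sequence of whole-list any()-scans and a filtered comprehension by a recursive per-line classifier: it merges the bullet and numbered tests into one per-line predicate, early-returns the list classification at the first matching line without looking at the rest, and threads the double-space counts of non-blank lines through the recursion, applying the table/paragraph decision at the base case.
import Mathlib
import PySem

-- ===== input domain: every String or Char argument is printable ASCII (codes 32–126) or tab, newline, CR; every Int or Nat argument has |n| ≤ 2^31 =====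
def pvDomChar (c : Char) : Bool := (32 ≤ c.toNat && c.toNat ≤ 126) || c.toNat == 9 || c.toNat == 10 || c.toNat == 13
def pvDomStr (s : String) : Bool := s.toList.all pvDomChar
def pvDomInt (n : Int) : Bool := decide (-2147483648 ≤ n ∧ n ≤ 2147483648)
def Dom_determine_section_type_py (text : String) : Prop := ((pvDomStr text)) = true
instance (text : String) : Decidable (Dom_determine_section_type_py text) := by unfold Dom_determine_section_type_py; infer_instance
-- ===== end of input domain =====

-- B replaces A's whole-list any()-scans by a recursive per-line classifier that
-- early-returns at the first list-like line and threads the space counts through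
-- the recursion; alternative decomposition, same O(n) cost.

-- ===== PORT A =====
-- line.strip().startswith(('•', '-', '*', '◦'))
def pvBulletLine (line : List Char) : Bool :=
  PySem.Chars.startswith (PySem.Chars.strip line) ['•'] ||
  PySem.Chars.startswith (PySem.Chars.strip line) ['-'] ||
  PySem.Chars.startswith (PySem.Chars.strip line) ['*'] ||
  PySem.Chars.startswith (PySem.Chars.strip line) ['◦']

-- line.strip() and line.strip()[0].isdigit() and ('.' in line[:10] or ')' in line[:10])
def pvNumberedLine (line : List Char) : Bool :=
  match PySem.Chars.strip line with
  | [] => false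
  | c :: _ =>
      PySem.Chars.isdigit c &&
      (PySem.Chars.isIn ['.'] (PySem.Chars.slice line none (some 10)) ||
       PySem.Chars.isIn [')'] (PySem.Chars.slice line none (some 10)))

-- str.isupper(): at least one cased char and no lowercase char — exact on the ASCII domain
def pvStrUpperCase (cs : List Char) : Bool :=
  cs.any PySem.Chars.isalpha && cs.all (fun c => !(PySem.Chars.islower c))

-- space_counts and max(space_counts) >= 2 and len(set(space_counts)) <= 2
def pvTableTest (space_counts : List Nat) : Bool :=
  !space_counts.isEmpty &&
  (match PySem.List.max? space_counts id with | some m => decide (2 ≤ m) | none => false) &&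
  decide ((PySem.Set.ofList space_counts).length ≤ 2)

def determine_section_type_py (text : String) : String :=
  let t := PySem.Chars.strip text.toList
  let lines := PySem.Chars.splitOn t ['\n']
  if lines.length == 1 && decide (t.length < 100) &&
     (pvStrUpperCase t || !(PySem.Chars.endswith t ['.'])) then "heading"
  else if lines.any pvBulletLine then "list_item"
  else if lines.any pvNumberedLine then "list_item"
  else if decide (1 < lines.length) &&
       pvTableTest ((lines.filter (fun l => !(PySem.Chars.strip l).isEmpty)).map
                      (fun l => PySem.Chars.count l [' ', ' '])) then "table"
  else "paragraph"

-- ===== PORT B =====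
-- the merged per-line test: s and (s[0] in '•-*◦' or (s[0].isdigit() and ...))
def pvListyLine (line : List Char) : Bool :=
  match PySem.Chars.strip line with
  | [] => false
  | c :: _ =>
      (c == '•' || c == '-' || c == '*' || c == '◦') ||
      (PySem.Chars.isdigit c &&
       (PySem.Chars.isIn ['.'] (PySem.Chars.slice line none (some 10)) ||
        PySem.Chars.isIn [')'] (PySem.Chars.slice line none (some 10))))

-- _scan(lines, multi, counts): recursive classifier with accumulator
def pvScan (lines : List (List Char)) (multi : Bool) (counts : List Nat) : String :=
  match lines with
  | [] =>
      if multi && pvTableTest counts then "table" else "paragraph"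
  | line :: rest =>
      if pvListyLine line then "list_item"
      else pvScan rest multi
             (if (PySem.Chars.strip line).isEmpty then counts
              else counts ++ [PySem.Chars.count line [' ', ' ']])

def determine_section_type_py_alt (text : String) : String :=
  let t := PySem.Chars.strip text.toList
  let lines := PySem.Chars.splitOn t ['\n']
  if lines.length == 1 && decide (t.length < 100) &&
     (pvStrUpperCase t || !(PySem.Chars.endswith t ['.'])) then "heading"
  else pvScan lines (decide (1 < lines.length)) []

-- ===== PRECONDITION & SPEC =====
def Spec_determine_section_type_py (text : String) (out : String) : Prop := out = determine_section_type_py_alt text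
instance (text : String) (out : String) : Decidable (Spec_determine_section_type_py text out) := by unfold Spec_determine_section_type_py; infer_instance

-- ===== CLAIM (what is proved, stated in full; the proofs are below) =====
def Claim_equal_determine_section_type_py : Prop := ∀ (text : String), Dom_determine_section_type_py text → Spec_determine_section_type_py text (determine_section_type_py text)

-- ===== LEMMAS AND PROOFS =====
-- startswith with a one-char prefix on a nonempty list is a head comparison
theorem pvStartswithSingle (c x : Char) (cs : List Char) :
    PySem.Chars.startswith (c :: cs) [x] = (c == x) := by
  simp [PySem.Chars.startswith, List.isPrefixOf]
  exact eq_comm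

-- the merged per-line predicate is A's bullet-or-numbered disjunction
theorem pvListyLine_eq (line : List Char) :
    pvListyLine line = (pvBulletLine line || pvNumberedLine line) := by
  unfold pvListyLine pvBulletLine pvNumberedLine
  cases h : PySem.Chars.strip line with
  | nil => simp [PySem.Chars.startswith]
  | cons c cs =>
      simp only [pvStartswithSingle]

-- the recursion computes A's branch cascade on the remaining lines
theorem pvScan_eq (lines : List (List Char)) (multi : Bool) (counts : List Nat) :
    pvScan lines multi counts =
      (if lines.any pvBulletLine then "list_item"
       else if lines.any pvNumberedLine then "list_item"
       else if multi && pvTableTest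
              (counts ++ (lines.filter (fun l => !(PySem.Chars.strip l).isEmpty)).map
                 (fun l => PySem.Chars.count l [' ', ' '])) then "table"
       else "paragraph") := by
  induction lines generalizing counts with
  | nil => simp [pvScan]
  | cons l ls ih =>
      simp only [pvScan, List.any_cons, List.filter_cons, pvListyLine_eq]
      by_cases hb : pvBulletLine l = true
      · simp [hb]
      · by_cases hn : pvNumberedLine l = true
        · simp [hn, Bool.or_true]
        · simp only [hb, hn, Bool.false_or, Bool.or_false]
          rw [if_neg (by simp), ih]
          by_cases hs : (PySem.Chars.strip l).isEmpty
          · simp [hs]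
          · simp [hs]

-- ===== VERDICT (by name: the statement is the Claim_ definition above) =====
theorem determine_section_type_py_spec : Claim_equal_determine_section_type_py := by
  intro text _
  unfold Spec_determine_section_type_py determine_section_type_py determine_section_type_py_alt
  simp only [pvScan_eq, List.nil_append]
  rfl
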